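-- pv_equiv track=rewrite | github.com/vishalvish16/society_management | code_fixer.py | _smart_excerpt
-- ===== SOURCE A (Python) =====
-- def _smart_excerpt(content: str, keywords: list, max_chars: int = 3000) -> str:
--     """
--     If file is large, return only the most relevant section around keyword hits
--     rather than truncating from the top. Keeps imports + relevant block.
--     """
--     if len(content) <= max_chars:
--         return content
--
--     lines = content.splitlines()
--     kw_lower = [k.lower() for k in keywords]
--
--     # Score each line by keyword hits
--     scored = []
--     for i, line in enumerate(lines):
--         ll = line.lower()
--         hits = sum(1 for k in kw_lower if k in ll)
--         if hits:
--             scored.append((hits, i))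
--
--     if not scored:
--         # No keyword hits — return start + end
--         half = max_chars // 2
--         return content[:half] + "\n\n... [truncated] ...\n\n" + content[-half:]
--
--     # Sort by score, take top hit, expand context ±60 lines
--     scored.sort(key=lambda x: -x[0])
--     center = scored[0][1]
--     start  = max(0, center - 60)
--     end    = min(len(lines), center + 60)
--
--     # Always include imports (first ~15 lines)
--     imports = lines[:15]
--     snippet = lines[start:end]
--
--     result = "\n".join(imports) + "\n\n// ... [relevant section] ...\n\n" + "\n".join(snippet)
--     return result[:max_chars]
-- ===== SOURCE B (Python) =====
-- def _line_scores(lines: list, keywords: list) -> list: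
--     kws = [k.lower() for k in keywords]
--
--     def score(line):
--         ll = line.lower()
--         return sum(1 for k in kws if k in ll)
--
--     return [score(line) for line in lines]
--
--
-- def _truncated_ends(content: str, max_chars: int) -> str:
--     half = max_chars // 2
--     return content[:half] + "\n\n... [truncated] ...\n\n" + content[-half:]
--
--
-- def _context_block(lines: list, center: int, max_chars: int) -> str:
--     start = max(0, center - 60)
--     end = min(len(lines), center + 60)
--     return ("\n".join(lines[:15])
--             + "\n\n// ... [relevant section] ...\n\n"
--             + "\n".join(lines[start:end]))[:max_chars]
--
--
-- def _smart_excerpt(content: str, keywords: list, max_chars: int = 3000) -> str: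
--     """Decomposed variant: build a plain list of line scores, then pick
--     max() and its first index (scores.index) -- no (hits, index) pairs, no sort."""
--     if len(content) <= max_chars:
--         return content
--     lines = content.splitlines()
--     scores = _line_scores(lines, keywords)
--     top = max(scores, default=0)
--     if top == 0:
--         return _truncated_ends(content, max_chars)
--     return _context_block(lines, scores.index(top), max_chars)
-- ===== Notes on version B (the rewrite author's own statement) =====
-- stated objective: simpler
-- what changed: Replaces the (hits, index) pair list plus stable sort with a plain list of line scores whose max() and first index (scores.index) select the center (equal by the earliest-max tie-break of the stable sort), decomposed into small helper functions.
import Mathlib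
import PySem

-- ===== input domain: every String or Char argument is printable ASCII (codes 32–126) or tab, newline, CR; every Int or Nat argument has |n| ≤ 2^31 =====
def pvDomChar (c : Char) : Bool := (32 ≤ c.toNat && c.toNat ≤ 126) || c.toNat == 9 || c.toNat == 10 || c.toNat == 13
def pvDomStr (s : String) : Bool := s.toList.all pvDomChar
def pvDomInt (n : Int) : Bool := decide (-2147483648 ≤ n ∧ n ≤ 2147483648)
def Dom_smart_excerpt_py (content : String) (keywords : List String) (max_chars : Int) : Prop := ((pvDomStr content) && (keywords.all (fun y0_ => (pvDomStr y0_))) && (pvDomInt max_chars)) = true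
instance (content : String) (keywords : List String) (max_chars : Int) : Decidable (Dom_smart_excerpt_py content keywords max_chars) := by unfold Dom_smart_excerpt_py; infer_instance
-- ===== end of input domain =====

-- B replaces A's scored-pair list + stable sort with a plain score list, max() and .index(), split into small helpers (objective: simpler).


-- shared scoring helper: hits = sum(1 for k in kw_lower if k in line.lower()) — identical inline code in both Pythons
def pvScore (kws : List String) (line : String) : Int :=
  let ll := PySem.Str.lower line
  kws.foldl (fun s k => if PySem.Str.isIn k ll then s + 1 else s) 0

-- ===== PORT A =====
def smart_excerpt_py (content : String) (keywords : List String) (max_chars : Int) : String :=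
  if PySem.Str.len content ≤ max_chars then content
  else
    let lines := PySem.Str.splitlines content
    let kw_lower := keywords.map PySem.Str.lower
    let scored := (PySem.List.enumerate lines).foldl
      (fun (acc : List (Int × Int)) p =>
        let hits := pvScore kw_lower p.2
        if hits ≠ 0 then acc ++ [(hits, p.1)] else acc) []
    if scored = [] then
      let half := PySem.Int.floordiv max_chars 2
      PySem.Str.join "" [PySem.Str.slice content none (some half),
                         "\n\n... [truncated] ...\n\n",
                         PySem.Str.slice content (some (-half)) none]
    else
      let center := ((PySem.List.sorted scored (fun x => -x.1)).headD (0, 0)).2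
      let start := max 0 (center - 60)
      let stop := min (lines.length : Int) (center + 60)
      let imports := PySem.List.slice lines none (some 15)
      let snippet := PySem.List.slice lines (some start) (some stop)
      PySem.Str.slice (PySem.Str.join "" [PySem.Str.join "\n" imports,
                                          "\n\n// ... [relevant section] ...\n\n",
                                          PySem.Str.join "\n" snippet]) none (some max_chars)

-- ===== PORT B =====  (Source B: _line_scores / _truncated_ends / _context_block helpers, max(), scores.index())
def pvLineScores (lines : List String) (keywords : List String) : List Int :=
  let kws := keywords.map PySem.Str.lower
  lines.map (fun line => pvScore kws line)

def pvTruncatedEnds (content : String) (max_chars : Int) : String :=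
  let half := PySem.Int.floordiv max_chars 2
  PySem.Str.join "" [PySem.Str.slice content none (some half),
                     "\n\n... [truncated] ...\n\n",
                     PySem.Str.slice content (some (-half)) none]

def pvContextBlock (lines : List String) (center : Int) (max_chars : Int) : String :=
  let start := max 0 (center - 60)
  let stop := min (lines.length : Int) (center + 60)
  PySem.Str.slice (PySem.Str.join "" [PySem.Str.join "\n" (PySem.List.slice lines none (some 15)),
                                      "\n\n// ... [relevant section] ...\n\n",
                                      PySem.Str.join "\n" (PySem.List.slice lines (some start) (some stop))]) none (some max_chars)

def smart_excerpt_py_alt (content : String) (keywords : List String) (max_chars : Int) : String :=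
  if PySem.Str.len content ≤ max_chars then content
  else
    let lines := PySem.Str.splitlines content
    let scores := pvLineScores lines keywords
    let top := PySem.List.maxD scores (fun y => y) 0
    if top = 0 then pvTruncatedEnds content max_chars
    else
      -- scores.index(top): top > 0 is the maximum of scores, hence present; getD 0 is never taken
      pvContextBlock lines (((PySem.List.index? scores top).getD 0 : Nat) : Int) max_chars

-- ===== PRECONDITION & SPEC =====
def Spec_smart_excerpt_py (content : String) (keywords : List String) (max_chars : Int) (out : String) : Prop := out = smart_excerpt_py_alt content keywords max_chars
instance (content : String) (keywords : List String) (max_chars : Int) (out : String) : Decidable (Spec_smart_excerpt_py content keywords max_chars out) := by unfold Spec_smart_excerpt_py; infer_instance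

-- ===== CLAIM =====
def Claim_equal_smart_excerpt_py : Prop := ∀ (content : String) (keywords : List String) (max_chars : Int), Dom_smart_excerpt_py content keywords max_chars → Spec_smart_excerpt_py content keywords max_chars (smart_excerpt_py content keywords max_chars)

-- ===== LEMMAS AND PROOFS =====

-- the running-maximum update on (hits, index) pairs that A's sorted-head selection amounts to
def pvUpd (s q : Int × Int) : Int × Int := if s.1 < q.1 then q else s

lemma pvScore_nonneg (kws : List String) (line : String) : 0 ≤ pvScore kws line := by
  unfold pvScore
  have h : ∀ (l : List String) (s : Int), 0 ≤ s →
      0 ≤ l.foldl (fun s k => if PySem.Str.isIn k (PySem.Str.lower line) then s + 1 else s) s := by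
    intro l
    induction l with
    | nil => intro s hs; simpa using hs
    | cons k t ih =>
      intro s hs
      simp only [List.foldl_cons]
      split <;> [exact ih _ (by omega); exact ih _ hs]
  exact h _ 0 le_rfl

lemma pvUpd_fst_le (qs : List (Int × Int)) : ∀ b : Int × Int, b.1 ≤ (qs.foldl pvUpd b).1 := by
  induction qs with
  | nil => intro b; simp
  | cons q t ih =>
    intro b
    have h1 : b.1 ≤ (pvUpd b q).1 := by unfold pvUpd; split <;> omega
    exact le_trans h1 (ih (pvUpd b q))

lemma pvUpd_skip_zero (qs : List (Int × Int)) :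
    ∀ b : Int × Int, 0 ≤ b.1 → (∀ q ∈ qs, 0 ≤ q.1) →
    qs.foldl pvUpd b = (qs.filter (fun q => q.1 ≠ 0)).foldl pvUpd b := by
  induction qs with
  | nil => intro b _ _; rfl
  | cons q t ih =>
    intro b hb hall
    by_cases hq : q.1 = 0
    · have hupd : pvUpd b q = b := by unfold pvUpd; rw [if_neg (by omega)]
      simp only [List.foldl_cons, List.filter_cons, hupd]
      rw [if_neg (by simp [hq])]
      exact ih b hb (fun x hx => hall x (List.mem_cons_of_mem _ hx))
    · have hb' : 0 ≤ (pvUpd b q).1 := by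
        unfold pvUpd; split
        · exact hall q (List.mem_cons_self)
        · exact hb
      simp only [List.foldl_cons, List.filter_cons]
      rw [if_pos (by simp [hq])]
      simp only [List.foldl_cons]
      exact ih (pvUpd b q) hb' (fun x hx => hall x (List.mem_cons_of_mem _ hx))

-- head of the stable insertion sort = left fold of pvUpd from the first element
lemma pvSortedHead (rs : List (Int × Int)) :
    ∀ (y : Int × Int) (ys : List (Int × Int)),
    (rs.foldl (fun acc x => PySem.List.insertBy (fun a b => decide (-a.1 < -b.1)) x acc) (y :: ys)).headD (0, 0)
      = rs.foldl pvUpd y := by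
  induction rs with
  | nil => intro y ys; simp
  | cons r t ih =>
    intro y ys
    simp only [List.foldl_cons]
    by_cases h : y.1 < r.1
    · have : PySem.List.insertBy (fun a b => decide (-a.1 < -b.1)) r (y :: ys) = r :: y :: ys := by
        simp only [PySem.List.insertBy]
        rw [if_pos (by simp; omega)]
      rw [this, ih r (y :: ys)]
      congr 1
      unfold pvUpd; rw [if_pos h]
    · have : PySem.List.insertBy (fun a b => decide (-a.1 < -b.1)) r (y :: ys)
          = y :: PySem.List.insertBy (fun a b => decide (-a.1 < -b.1)) r ys := by
        simp only [PySem.List.insertBy]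
        rw [if_neg (by simp; omega)]
      rw [this, ih y _]
      congr 1
      unfold pvUpd; rw [if_neg h]

lemma pvSorted_head_eq (r : Int × Int) (rs : List (Int × Int)) :
    ((PySem.List.sorted (r :: rs) (fun x => -x.1)).headD (0, 0)) = rs.foldl pvUpd r := by
  rw [PySem.List.sorted_eq_foldl_insertBy]
  simp only [List.foldl_cons]
  have h0 : PySem.List.insertBy (fun a b => decide (-a.1 < -b.1)) r ([] : List (Int × Int)) = [r] := by
    simp [PySem.List.insertBy]
  rw [h0]
  exact pvSortedHead rs r []

-- the combined selection fact, phrased on the (hits, index) list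
lemma pvSelect (qs : List (Int × Int)) (hpos : ∀ q ∈ qs, 0 ≤ q.1) :
    (qs.filter (fun q => q.1 ≠ 0) = [] ↔ (qs.foldl pvUpd (0, 0)).1 = 0) ∧
    (∀ r rs, qs.filter (fun q => q.1 ≠ 0) = r :: rs →
      ((PySem.List.sorted (r :: rs) (fun x => -x.1)).headD (0, 0)) = qs.foldl pvUpd (0, 0)) := by
  have hskip := pvUpd_skip_zero qs (0, 0) le_rfl hpos
  constructor
  · constructor
    · intro he; rw [hskip, he]; rfl
    · intro hz
      rcases hf : qs.filter (fun q => q.1 ≠ 0) with _ | ⟨r, rs⟩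
      · exact hf
      · exfalso
        have hr : r ∈ qs.filter (fun q => q.1 ≠ 0) := by rw [hf]; exact List.mem_cons_self
        have hrq : r ∈ qs := List.mem_of_mem_filter hr
        have hrne : r.1 ≠ 0 := by simpa using List.of_mem_filter hr
        have hrpos : 0 < r.1 := lt_of_le_of_ne (hpos r hrq) (Ne.symm hrne)
        rw [hskip, hf] at hz
        simp only [List.foldl_cons] at hz
        have h1 : pvUpd (0, 0) r = r := by unfold pvUpd; rw [if_pos (by simpa using hrpos)]
        rw [h1] at hz
        have := pvUpd_fst_le rs r
        omega
  · intro r rs hf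
    have hr : r ∈ qs.filter (fun q => q.1 ≠ 0) := by rw [hf]; exact List.mem_cons_self
    have hrpos : 0 < r.1 :=
      lt_of_le_of_ne (hpos r (List.mem_of_mem_filter hr)) (Ne.symm (by simpa using List.of_mem_filter hr))
    rw [pvSorted_head_eq, hskip, hf]
    simp only [List.foldl_cons]
    congr 1
    unfold pvUpd; rw [if_pos (by simpa using hrpos)]

-- (hits, index) pairs over lines = swapped enumeration of the score list
lemma pvEnumMap (f : String → Int) : ∀ (l : List String) (s : Int),
    (PySem.List.enumerate l s).map (fun p => (f p.2, p.1))
      = (PySem.List.enumerate (l.map f) s).map (fun p => (p.2, p.1)) := by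
  intro l
  induction l with
  | nil => intro s; simp [PySem.List.enumerate_nil]
  | cons x t ih => intro s; simp [PySem.List.enumerate_cons, ih]

lemma pvFoldMaxMem : ∀ (t : List Int) (a : Int), t.foldl max a = a ∨ t.foldl max a ∈ t := by
  intro t
  induction t with
  | nil => intro a; left; rfl
  | cons x s ih =>
    intro a
    simp only [List.foldl_cons]
    rcases ih (max a x) with h | h
    · rcases max_choice a x with hm | hm
      · left; rw [h, hm]
      · right; rw [h, hm]; exact List.mem_cons_self
    · right; exact List.mem_cons_of_mem _ h

-- A's running-maximum fold over the swapped enumeration, characterised by max value and first index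
lemma pvFoldEnum (g : List Int) : ∀ (off : Int) (b : Int × Int),
    ((PySem.List.enumerate g off).map (fun p => (p.2, p.1))).foldl pvUpd b
      = if g.foldl max b.1 = b.1 then b
        else (g.foldl max b.1,
              off + (((PySem.List.index? g (g.foldl max b.1)).getD 0 : Nat) : Int)) := by
  induction g with
  | nil => intro off b; simp [PySem.List.enumerate_nil]
  | cons x t ih =>
    intro off b
    simp only [PySem.List.enumerate_cons, List.map_cons, List.foldl_cons]
    by_cases hx : b.1 < x
    · have hmx : max b.1 x = x := max_eq_right hx.le
      rw [hmx]
      have hb' : pvUpd b (x, off) = (x, off) := by unfold pvUpd; rw [if_pos hx]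
      rw [hb', ih (off + 1) (x, off)]
      have hle := (PySem.List.le_foldl_max t x).1
      by_cases hMx : t.foldl max x = x
      · rw [if_pos hMx, if_neg (by omega), hMx, PySem.List.index?_cons_self]
        simp
      · have hmem : t.foldl max x ∈ t := (pvFoldMaxMem t x).resolve_left hMx
        have hne : x ≠ t.foldl max x := fun hh => hMx hh.symm
        rw [if_neg hMx, if_neg (by omega), PySem.List.index?_cons_of_ne t hne]
        obtain ⟨k, hk⟩ := Option.isSome_iff_exists.mp
          ((PySem.List.index?_isSome_iff t (t.foldl max x)).mpr hmem)
        rw [hk]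
        simp only [Option.map_some, Option.getD_some, Prod.mk.injEq]
        exact ⟨trivial, by push_cast; ring⟩
    · have hmx : max b.1 x = b.1 := max_eq_left (by omega)
      rw [hmx]
      have hb' : pvUpd b (x, off) = b := by unfold pvUpd; rw [if_neg hx]
      rw [hb', ih (off + 1) b]
      by_cases hMb : t.foldl max b.1 = b.1
      · rw [if_pos hMb, if_pos hMb]
      · have hle := (PySem.List.le_foldl_max t b.1).1
        have hmem : t.foldl max b.1 ∈ t := (pvFoldMaxMem t b.1).resolve_left hMb
        have hne : x ≠ t.foldl max b.1 := by omega
        rw [if_neg hMb, if_neg hMb, PySem.List.index?_cons_of_ne t hne]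
        obtain ⟨k, hk⟩ := Option.isSome_iff_exists.mp
          ((PySem.List.index?_isSome_iff t (t.foldl max b.1)).mpr hmem)
        rw [hk]
        simp only [Option.map_some, Option.getD_some, Prod.mk.injEq]
        exact ⟨trivial, by push_cast; ring⟩

-- B's max(scores, default=0) = the running max from 0, for nonnegative scores
lemma pvMaxD_eq (g : List Int) (hpos : ∀ x ∈ g, 0 ≤ x) :
    PySem.List.maxD g (fun y => y) 0 = g.foldl max 0 := by
  cases g with
  | nil => simp [PySem.List.maxD, PySem.List.max?]
  | cons x t =>
    have hx : 0 ≤ x := hpos x List.mem_cons_self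
    simp only [PySem.List.maxD, PySem.List.max?_id_cons, Option.getD_some, List.foldl_cons]
    rw [max_eq_right hx]

-- ===== VERDICT =====
theorem smart_excerpt_py_spec : Claim_equal_smart_excerpt_py := by
  intro content keywords max_chars _
  unfold Spec_smart_excerpt_py smart_excerpt_py smart_excerpt_py_alt
  by_cases h : PySem.Str.len content ≤ max_chars
  · rw [if_pos h, if_pos h]
  · rw [if_neg h, if_neg h]
    set lines := PySem.Str.splitlines content with hlines
    set kw := keywords.map PySem.Str.lower with hkw
    set qs : List (Int × Int) :=
      (PySem.List.enumerate lines).map (fun p => (pvScore kw p.2, p.1)) with hqs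
    set g : List Int := lines.map (pvScore kw) with hg
    have hposg : ∀ x ∈ g, 0 ≤ x := by
      intro x hx
      rcases List.mem_map.1 (hg ▸ hx) with ⟨l, _, rfl⟩
      exact pvScore_nonneg kw l
    have hpos : ∀ q ∈ qs, 0 ≤ q.1 := by
      intro q hq
      rcases List.mem_map.1 (hqs ▸ hq) with ⟨p, _, rfl⟩
      exact pvScore_nonneg kw p.2
    have hscores : pvLineScores lines keywords = g := by
      simp [pvLineScores, hg, hkw]
    have hscored : (PySem.List.enumerate lines).foldl
        (fun (acc : List (Int × Int)) p =>
          let hits := pvScore kw p.2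
          if hits ≠ 0 then acc ++ [(hits, p.1)] else acc) []
        = qs.filter (fun q => q.1 ≠ 0) := by
      rw [hqs, List.filter_map]
      simp only [Function.comp_def]
      simpa using PySem.List.foldl_append_if
        (fun (p : Int × String) => decide (pvScore kw p.2 ≠ 0))
        (fun (p : Int × String) => (pvScore kw p.2, p.1))
        (PySem.List.enumerate lines) []
    have hfold : qs.foldl pvUpd (0, 0)
        = if g.foldl max 0 = 0 then ((0 : Int), (0 : Int))
          else (g.foldl max 0, (((PySem.List.index? g (g.foldl max 0)).getD 0 : Nat) : Int)) := by
      rw [hqs, pvEnumMap (pvScore kw) lines 0, ← hg, pvFoldEnum g 0 (0, 0)]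
      split <;> simp
    have htop : PySem.List.maxD g (fun y => y) 0 = g.foldl max 0 := pvMaxD_eq g hposg
    obtain ⟨hiff, hhead⟩ := pvSelect qs hpos
    simp only [hscored, hscores, htop]
    rcases hf : qs.filter (fun q => q.1 ≠ 0) with _ | ⟨r, rs⟩
    · have hz : (qs.foldl pvUpd (0, 0)).1 = 0 := hiff.1 hf
      have hM : g.foldl max 0 = 0 := by
        by_contra hM
        rw [hfold, if_neg hM] at hz
        exact hM hz
      rw [hf, if_pos rfl, if_pos hM]
      rfl
    · have hne : r :: rs ≠ [] := by simp
      have hbz : ¬ (qs.foldl pvUpd (0, 0)).1 = 0 := fun hz => hne (hf.symm.trans (hiff.2 hz))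
      have hM : ¬ g.foldl max 0 = 0 := by
        intro hM
        rw [hfold, if_pos hM] at hbz
        exact hbz rfl
      have hcen : ((PySem.List.sorted (r :: rs) (fun x => -x.1)).headD (0, 0)).2
          = (((PySem.List.index? g (g.foldl max 0)).getD 0 : Nat) : Int) := by
        rw [hhead r rs hf, hfold, if_neg hM]
      rw [hf, if_neg hne, if_neg hM, hcen]
      rfl
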